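-- pv_equiv track=rewrite | github.com/dpinedaj/PythonLearning | challenges/hackerRank/python/mergeTheTools.py | merge_the_tools
-- ===== SOURCE A (Python) =====
-- def merge_the_tools(s, k):
--     strings = [s[i : i + k] for i in range(0, len(s) - k + 1, k)]
--     result = list()
--     for i in strings:
--         lista = list()
--         for j in i:
--             if j not in lista:
--                 lista.append(j)
--         result.append("".join(lista))
--
--     return result
-- ===== SOURCE B (Python) =====
-- def merge_the_tools(s, k):
--     result = []
--     seen = set()
--     buf = []
--     for idx, ch in enumerate(s):
--         if ch not in seen:
--             seen.add(ch)
--             buf.append(ch)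
--         if (idx + 1) % k == 0:
--             result.append("".join(buf))
--             seen = set()
--             buf = []
--     return result
-- ===== Notes on version B (the rewrite author's own statement) =====
-- stated objective: alternative
-- what changed: B makes a single linear pass over enumerate(s) with a running seen-set and buffer, flushing a deduplicated chunk whenever (idx+1) % k == 0, instead of A's first building the list of chunk substrings via slicing and then deduplicating each chunk with an inner membership scan.
-- outside the precondition, e.g. on merge_the_tools('abc', 0): A raises ValueError, B raises ZeroDivisionError; on merge_the_tools('abc', -1): A returns [], B returns ['a', 'b', 'c']
import Mathlib
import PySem

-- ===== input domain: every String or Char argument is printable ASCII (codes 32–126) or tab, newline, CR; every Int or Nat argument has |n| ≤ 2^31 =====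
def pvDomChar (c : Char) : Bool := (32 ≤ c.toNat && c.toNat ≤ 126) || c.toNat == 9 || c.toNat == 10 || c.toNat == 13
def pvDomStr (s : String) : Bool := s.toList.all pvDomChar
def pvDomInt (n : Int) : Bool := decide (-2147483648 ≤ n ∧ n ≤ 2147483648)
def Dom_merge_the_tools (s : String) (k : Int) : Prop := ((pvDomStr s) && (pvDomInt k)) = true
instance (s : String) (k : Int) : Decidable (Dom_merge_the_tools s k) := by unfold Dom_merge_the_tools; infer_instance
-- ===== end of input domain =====

-- B replaces A's slice-then-dedup two-phase structure by a single linear pass with a running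
-- seen-set/buffer flushed at every k-th index (objective: alternative decomposition).


-- ===== PORT A =====
-- strings = [s[i:i+k] for i in range(0, len(s)-k+1, k)]; then dedup each chunk by an inner scan.
def merge_the_tools (s : String) (k : Int) : List String :=
  ((PySem.List.pyRange 0 ((s.toList.length : Int) - k + 1) k).map
      (fun i => PySem.List.slice s.toList (some i) (some (i + k)))).foldl
    (fun result i =>
      result ++ [String.mk (i.foldl (fun lista j => if j ∈ lista then lista else lista ++ [j]) [])]) []

-- ===== PORT B =====
-- loop body of B: dedup-append into seen/buf, flush when (idx + 1) % k == 0
def bStep (k : Int) (st : List String × PySem.Set Char × List Char) (p : Int × Char) :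
    List String × PySem.Set Char × List Char :=
  let seenbuf := if PySem.Set.contains st.2.1 p.2 then st.2
                 else (PySem.Set.add st.2.1 p.2, st.2.2 ++ [p.2])
  if PySem.Int.mod (p.1 + 1) k = 0 then (st.1 ++ [String.mk seenbuf.2], (PySem.Set.empty, []))
  else (st.1, seenbuf)

-- single pass over enumerate(s) with the running (result, seen, buf) state
def merge_the_tools_alt (s : String) (k : Int) : List String :=
  ((PySem.List.enumerate s.toList 0).foldl (bStep k) ([], (PySem.Set.empty, []))).1

-- ===== PRECONDITION & SPEC =====
-- Pre_ restricts to the natural domain k ≥ 1: A raises ValueError at k = 0 (range step 0), and for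
-- k < 0 A's [] is an artefact of an empty negative-step range outside the natural domain (B also raises at k = 0).
def Pre_merge_the_tools (s : String) (k : Int) : Prop := 1 ≤ k
instance (s : String) (k : Int) : Decidable (Pre_merge_the_tools s k) := by unfold Pre_merge_the_tools; infer_instance
def pvWitness_merge_the_tools : String × Int := ("AABCAAADA", 3)
def Spec_merge_the_tools (s : String) (k : Int) (out : List String) : Prop := out = merge_the_tools_alt s k
instance (s : String) (k : Int) (out : List String) : Decidable (Spec_merge_the_tools s k out) := by unfold Spec_merge_the_tools; infer_instance

-- ===== CLAIM (what is proved, stated in full; the proofs are below) =====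
def Claim_equal_merge_the_tools : Prop := ∀ (s : String) (k : Int), Dom_merge_the_tools s k → Pre_merge_the_tools s k → Spec_merge_the_tools s k (merge_the_tools s k)

-- ===== LEMMAS AND PROOFS =====

-- A's inner dedup loop, as a function of the initial accumulator
def dedupFold (buf : List Char) (l : List Char) : List Char :=
  l.foldl (fun lista j => if j ∈ lista then lista else lista ++ [j]) buf

-- clean recursion mirroring B's loop body (after the seen-set is identified with the buffer)
def specB (k : Int) : List Char → Int → List Char → List String
  | [], _, _ => []
  | c :: cs, t, buf =>
    let buf' := if c ∈ buf then buf else buf ++ [c]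
    if PySem.Int.mod (t + 1) k = 0 then String.mk buf' :: specB k cs (t + 1) []
    else specB k cs (t + 1) buf'

lemma B_loop (k : Int) (cs : List Char) : ∀ (t : Int) (res : List String) (buf : List Char),
    ((PySem.List.enumerate cs t).foldl (bStep k) (res, (buf, buf))).1 = res ++ specB k cs t buf := by
  induction cs with
  | nil => intro t res buf; simp [PySem.List.enumerate, specB]
  | cons c cs ih =>
    intro t res buf
    rw [PySem.List.enumerate_cons, List.foldl_cons]
    by_cases hm : c ∈ buf <;> by_cases hz : PySem.Int.mod (t + 1) k = 0 <;>
      simp only [specB, hm, hz, if_true, if_false]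
    · have hstep : bStep k (res, (buf, buf)) (t, c) = (res ++ [String.mk buf], (PySem.Set.empty, [])) := by
        simp [bStep, PySem.Set.contains, hm, hz]
      rw [hstep]
      have := ih (t + 1) (res ++ [String.mk buf]) []
      simp only [PySem.Set.empty] at this ⊢
      rw [this]
      simp
    · have hstep : bStep k (res, (buf, buf)) (t, c) = (res, (buf, buf)) := by
        simp [bStep, PySem.Set.contains, hm, hz]
      rw [hstep, ih]
    · have hstep : bStep k (res, (buf, buf)) (t, c)
          = (res ++ [String.mk (buf ++ [c])], (PySem.Set.empty, [])) := by
        simp [bStep, PySem.Set.contains, PySem.Set.add, hm, hz]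
      rw [hstep]
      have := ih (t + 1) (res ++ [String.mk (buf ++ [c])]) []
      simp only [PySem.Set.empty] at this ⊢
      rw [this]
      simp
    · have hstep : bStep k (res, (buf, buf)) (t, c) = (res, (buf ++ [c], buf ++ [c])) := by
        simp [bStep, PySem.Set.contains, PySem.Set.add, hm, hz]
      rw [hstep, ih]

-- within one chunk: r steps remain until the next flush index
lemma specB_chunk (k : Int) (hk : 1 ≤ k) :
    ∀ (r : Nat) (cs : List Char) (t : Int) (buf : List Char),
    0 < r → (r : Int) ≤ k → k ∣ (t + r) →
    specB k cs t buf =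
      if cs.length < r then []
      else String.mk (dedupFold buf (cs.take r)) :: specB k (cs.drop r) (t + r) [] := by
  intro r
  induction r with
  | zero => intro cs t buf h; omega
  | succ r ih =>
    intro cs t buf _ hrk hdvd
    cases cs with
    | nil => simp [specB]
    | cons c cs' =>
      by_cases hr0 : r = 0
      · subst hr0
        have h1 : PySem.Int.mod (t + 1) k = 0 := by
          rw [PySem.Int.mod_eq_zero_iff_dvd]
          simpa using hdvd
        have hnl : ¬ ((c :: cs').length < 1) := by simp
        simp only [specB, h1, if_true, hnl, if_false, dedupFold, List.take_succ_cons,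
          List.take_zero, List.drop_succ_cons, List.drop_zero, List.foldl_cons, List.foldl_nil]
        have ht : t + ((0:Nat) + 1 : Nat) = t + 1 := by push_cast; ring
        rw [ht]
      · have h1 : ¬ PySem.Int.mod (t + 1) k = 0 := by
          rw [PySem.Int.mod_eq_zero_iff_dvd]
          intro hd
          have hsub : k ∣ ((t + ((r:Int) + 1)) - (t + 1)) := by
            apply Int.dvd_sub _ hd
            simpa using hdvd
          have hrr : ((t + ((r:Int) + 1)) - (t + 1)) = (r : Int) := by ring
          rw [hrr] at hsub
          have := Int.le_of_dvd (by exact_mod_cast Nat.pos_of_ne_zero hr0) hsub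
          omega
        simp only [specB, h1, if_false]
        rw [ih cs' (t + 1) (if c ∈ buf then buf else buf ++ [c]) (Nat.pos_of_ne_zero hr0)
            (by push_cast at hrk ⊢; omega)
            (by have h2 : t + 1 + (r : Int) = t + ((r:Int) + 1) := by ring
                rw [h2]; simpa using hdvd)]
        have hlen : ((c :: cs').length < r + 1) ↔ (cs'.length < r) := by simp
        have hT : t + 1 + (r : Int) = t + (((r:Nat) + 1 : Nat) : Int) := by push_cast; ring
        by_cases hl : cs'.length < r
        · simp only [hlen, hl] at *
          simp
        · simp only [hlen, hl, if_false, List.take_succ_cons, List.drop_succ_cons, hT]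
          simp [dedupFold]

-- the reference chunking recursion (full chunks of length k, each deduplicated)
def chunksSpec (k : Nat) (cs : List Char) : List String :=
  if _h : cs.length < k ∨ k = 0 then []
  else String.mk (dedupFold [] (cs.take k)) :: chunksSpec k (cs.drop k)
termination_by cs.length
decreasing_by
  simp only [List.length_drop]
  omega

lemma specB_eq_chunksSpec (kn : Nat) (hk : 1 ≤ kn) (cs : List Char) :
    ∀ (t : Int), (kn : Int) ∣ t → specB (kn : Int) cs t [] = chunksSpec kn cs := by
  induction hn : cs.length using Nat.strong_induction_on generalizing cs with
  | _ n ih =>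
    intro t ht
    subst hn
    rw [specB_chunk (kn : Int) (by exact_mod_cast hk) kn cs t [] (by omega) (by omega)
        (Dvd.dvd.add ht dvd_rfl)]
    rw [chunksSpec]
    by_cases hl : cs.length < kn
    · simp [hl]
    · have hk0 : ¬ (cs.length < kn ∨ kn = 0) := by omega
      rw [if_neg hl, dif_neg hk0]
      congr 1
      exact ih (cs.drop kn).length (by simp [List.length_drop]; omega) _ rfl _
        (Dvd.dvd.add ht dvd_rfl)

-- A's chunks, rewritten to drop/take form, match chunksSpec
lemma map_chunks (kn : Nat) (hk : 1 ≤ kn) :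
    ∀ (q : Nat) (cs : List Char), cs.length / kn = q →
    (List.range q).map (fun t => String.mk (dedupFold [] ((cs.drop (kn * t)).take kn)))
      = chunksSpec kn cs := by
  intro q
  induction q with
  | zero =>
    intro cs hq
    have hlt : cs.length < kn := by
      rcases Nat.lt_or_ge cs.length kn with h | h
      · exact h
      · exfalso; have := Nat.div_pos h (by omega); omega
    rw [chunksSpec, dif_pos (Or.inl hlt)]
    simp
  | succ q ihq =>
    intro cs hq
    have hge : kn ≤ cs.length := by
      by_contra h
      rw [Nat.div_eq_of_lt (by omega)] at hq
      omega
    rw [chunksSpec, dif_neg (by omega : ¬ (cs.length < kn ∨ kn = 0))]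
    rw [List.range_succ_eq_map, List.map_cons, List.map_map]
    congr 1
    have hq' : (cs.drop kn).length / kn = q := by
      obtain ⟨m, hm⟩ : ∃ m, cs.length = kn + m := ⟨cs.length - kn, by omega⟩
      simp only [List.length_drop, hm, Nat.add_sub_cancel_left]
      rw [hm, Nat.add_comm kn m, Nat.add_div_right _ (by omega)] at hq
      omega
    rw [← ihq (cs.drop kn) hq']
    apply List.map_congr_left
    intro t _
    simp only [Function.comp]
    rw [List.drop_drop]
    have h3 : kn * t.succ = kn + kn * t := by rw [Nat.succ_eq_add_one, Nat.mul_succ]; omega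
    rw [h3]
  -- (tail chunks of cs are the chunks of cs.drop kn)

lemma A_eq_chunksSpec (kn : Nat) (hk : 1 ≤ kn) (cs : List Char) :
    ((PySem.List.pyRange 0 ((cs.length : Int) - (kn : Int) + 1) (kn : Int)).map
        (fun i => PySem.List.slice cs (some i) (some (i + (kn : Int))))).map
      (fun chunk => String.mk (dedupFold [] chunk))
    = chunksSpec kn cs := by
  rw [PySem.List.pyRange_of_pos 0 ((cs.length : Int) - (kn : Int) + 1) (by exact_mod_cast hk)]
  have hcount : (if (0:Int) < (cs.length : Int) - (kn : Int) + 1 then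
      (((cs.length : Int) - (kn : Int) + 1 - 0 + (kn : Int) - 1) / (kn : Int)).toNat else 0)
      = cs.length / kn := by
    by_cases h : (0:Int) < (cs.length : Int) - (kn : Int) + 1
    · rw [if_pos h]
      have h2 : ((cs.length : Int) - (kn : Int) + 1 - 0 + (kn : Int) - 1) = (cs.length : Int) := by ring
      rw [h2, ← Int.natCast_ediv, Int.toNat_natCast]
    · rw [if_neg h]
      have hlt : cs.length < kn := by omega
      rw [Nat.div_eq_of_lt hlt]
  rw [hcount, List.map_map, List.map_map]
  rw [← map_chunks kn hk (cs.length / kn) cs rfl]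
  apply List.map_congr_left
  intro t _
  simp only [Function.comp]
  have h1 : (0 + (kn : Int) * (t : Int)) = ((kn * t : Nat) : Int) := by push_cast; ring
  rw [h1, PySem.List.slice_natCast_add]

-- ===== VERDICT (by name: the statement is the Claim_ definition above) =====
theorem merge_the_tools_spec : Claim_equal_merge_the_tools := by
  intro s k _ hk
  unfold Pre_merge_the_tools at hk
  unfold Spec_merge_the_tools merge_the_tools merge_the_tools_alt
  obtain ⟨kn, rfl⟩ : ∃ kn : Nat, k = (kn : Int) := ⟨k.toNat, (Int.toNat_of_nonneg (by omega)).symm⟩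
  have hk1 : 1 ≤ kn := by exact_mod_cast hk
  simp only [PySem.Set.empty]
  rw [B_loop, PySem.List.foldl_append_singleton_eq_map]
  rw [List.nil_append, List.nil_append]
  rw [specB_eq_chunksSpec kn hk1 s.toList 0 (dvd_zero _)]
  have := A_eq_chunksSpec kn hk1 s.toList
  rw [← this]
  simp only [List.map_map]
  apply List.map_congr_left
  intro i _
  simp [dedupFold, Function.comp]
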